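-- pv_equiv track=rewrite | github.com/ashuacademics/enzyms | scripts/calculate_anticipated_products_mz.py | simulate_variations
-- ===== SOURCE A (Python) =====
-- from itertools import product
--
-- def simulate_variations(element_counts, variations):
--     all_changes = {}
--     for element, (min_change, max_change) in variations.items():
--         all_changes[element] = range(min_change, max_change + 1)
--
--     simulated_formulas = set()  # Use a set to avoid duplicates
--     for changes in product(*all_changes.values()):
--         new_counts = element_counts.copy()
--         for i, element in enumerate(all_changes):
--             new_counts[element] = max(0, new_counts.get(element, 0) + changes[i])
--         new_formula = ''.join(f"{elem}{count}" for elem, count in new_counts.items() if count)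
--         simulated_formulas.add(new_formula)  # Add to set
--
--     return simulated_formulas
-- ===== SOURCE B (Python) =====
-- def simulate_variations(element_counts, variations):
--     # Depth-first recursion over the variation elements (no itertools.product):
--     # each element's range is first collapsed to its distinct clamped reachable
--     # counts, and every formula is assembled positionally from a precomputed key
--     # plan instead of copying and mutating a dict per combination.
--     var_elems = list(variations)
--     reach = []
--     for e, (mn, mx) in variations.items():
--         opts, seen = [], set()
--         for d in range(mn, mx + 1):
--             c = max(0, element_counts.get(e, 0) + d)
--             if c not in seen:
--                 seen.add(c)
--                 opts.append(c)
--         reach.append(opts)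
--     var_index = {e: i for i, e in enumerate(var_elems)}
--     key_order = list(element_counts) + [e for e in var_elems if e not in element_counts]
--     plan = [(k, var_index.get(k), element_counts.get(k, 0)) for k in key_order]
--
--     formulas = set()
--
--     def walk(i, chosen):
--         if i == len(reach):
--             parts = []
--             for k, vi, base in plan:
--                 c = base if vi is None else chosen[vi]
--                 if c:
--                     parts.append(f"{k}{c}")
--             formulas.add(''.join(parts))
--         else:
--             for c in reach[i]:
--                 walk(i + 1, chosen + [c])
--
--     walk(0, [])
--     return formulas
-- ===== Notes on version B (the rewrite author's own statement) =====
-- stated objective: alternative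
-- what changed: B replaces itertools.product and the per-combination dict copy/mutation with a depth-first recursion over the variation elements: each element's delta range is first collapsed to its distinct clamped reachable counts, the recursion extends a chosen-counts list one element at a time, and each formula is assembled positionally from a precomputed key plan; Pre_ only excludes association lists with duplicate keys, which cannot arise from Python dict arguments.
import Mathlib
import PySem

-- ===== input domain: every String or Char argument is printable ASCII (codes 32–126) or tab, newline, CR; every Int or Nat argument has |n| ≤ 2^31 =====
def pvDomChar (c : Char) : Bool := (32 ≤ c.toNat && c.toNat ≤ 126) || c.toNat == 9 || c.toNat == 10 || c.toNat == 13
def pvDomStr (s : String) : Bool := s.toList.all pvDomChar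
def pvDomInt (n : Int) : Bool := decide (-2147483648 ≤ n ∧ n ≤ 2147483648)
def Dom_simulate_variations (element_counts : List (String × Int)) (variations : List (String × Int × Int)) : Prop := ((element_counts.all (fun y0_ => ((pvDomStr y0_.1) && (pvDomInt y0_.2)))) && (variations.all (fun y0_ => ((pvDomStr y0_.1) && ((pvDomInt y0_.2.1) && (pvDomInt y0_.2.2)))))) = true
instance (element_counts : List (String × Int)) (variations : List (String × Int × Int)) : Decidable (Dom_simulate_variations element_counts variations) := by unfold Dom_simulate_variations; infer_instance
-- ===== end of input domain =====

-- B replaces itertools.product + per-combination dict copy/mutation by a depth-first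
-- recursion over the variation elements, with each element's range collapsed to its
-- distinct clamped reachable counts and formulas assembled from a precomputed key plan;
-- equal return value on dict-shaped (duplicate-free) inputs.

-- ===== PORT A =====
-- itertools.product over a list of pools (rightmost pool varies fastest)
def pyProduct : List (List Int) → List (List Int)
  | [] => [[]]
  | l :: ls => l.flatMap (fun x => (pyProduct ls).map (x :: ·))

def simulate_variations (element_counts : List (String × Int)) (variations : List (String × Int × Int)) : List String :=
  let all_changes : PySem.Dict String (List Int) :=
    variations.foldl (fun d p => d.insert p.1 (PySem.List.pyRange p.2.1 (p.2.2 + 1) 1)) PySem.Dict.empty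
  (pyProduct all_changes.values).foldl (fun simulated_formulas changes =>
    let new_counts : PySem.Dict String Int :=
      (PySem.List.enumerate all_changes.keys).foldl
        (fun d p => d.insert p.2 (max 0 (d.getD p.2 0 + PySem.List.pyGetD changes p.1 0)))
        (PySem.Dict.mk element_counts)
    let new_formula := PySem.Str.join "" ((new_counts.items.filter (fun q => q.2 != 0)).map
      (fun q => PySem.Str.join "" [q.1, PySem.Int.toStr q.2]))
    PySem.Set.add simulated_formulas new_formula) PySem.Set.empty

-- ===== PORT B =====
-- leaf of the recursion: build one formula from the plan and the chosen counts, add it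
def svEmit (plan : List (String × Option Int × Int)) (chosen : List Int) (formulas : PySem.Set String) : PySem.Set String :=
  let parts := plan.foldl (fun acc t =>
    let c : Int := match t.2.1 with
      | none => t.2.2
      | some i => PySem.List.pyGetD chosen i 0
    if c != 0 then acc ++ [PySem.Str.join "" [t.1, PySem.Int.toStr c]] else acc) []
  PySem.Set.add formulas (PySem.Str.join "" parts)

-- def walk(i, chosen): depth-first recursion over the remaining pools
def svWalk (plan : List (String × Option Int × Int)) : List (List Int) → List Int → PySem.Set String → PySem.Set String
  | [], chosen, formulas => svEmit plan chosen formulas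
  | opts :: rest, chosen, formulas =>
      opts.foldl (fun s c => svWalk plan rest (chosen ++ [c]) s) formulas

def simulate_variations_alt (element_counts : List (String × Int)) (variations : List (String × Int × Int)) : List String :=
  let var_elems := variations.map (·.1)
  -- per element: distinct clamped reachable counts, first occurrences (opts/seen loop)
  let reach : List (List Int) := variations.map (fun p =>
    ((PySem.List.pyRange p.2.1 (p.2.2 + 1) 1).foldl
      (fun (st : List Int × PySem.Set Int) d =>
        let c := max 0 (PySem.Dict.getD (PySem.Dict.mk element_counts) p.1 0 + d)
        if st.2.contains c then st else (st.1 ++ [c], PySem.Set.add st.2 c))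
      ([], PySem.Set.empty)).1)
  let var_index : PySem.Dict String Int :=
    (PySem.List.enumerate var_elems).foldl (fun d p => d.insert p.2 p.1) PySem.Dict.empty
  let key_order := element_counts.map (·.1) ++
    var_elems.filter (fun e => !((PySem.Dict.mk element_counts).contains e))
  let plan : List (String × Option Int × Int) :=
    key_order.map (fun k => (k, var_index.get? k, PySem.Dict.getD (PySem.Dict.mk element_counts) k 0))
  svWalk plan reach [] PySem.Set.empty

-- ===== PRECONDITION & SPEC =====
-- Pre_ excludes association lists with duplicate keys: they do not represent a Python dict
-- argument (dict[str, int] / dict[str, tuple[int, int]] keys are unique), so A never sees them.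
def Pre_simulate_variations (element_counts : List (String × Int)) (variations : List (String × Int × Int)) : Prop :=
  (element_counts.map (·.1)).Nodup ∧ (variations.map (·.1)).Nodup
instance (element_counts : List (String × Int)) (variations : List (String × Int × Int)) : Decidable (Pre_simulate_variations element_counts variations) := by unfold Pre_simulate_variations; infer_instance

def pvWitness_simulate_variations : (List (String × Int)) × (List (String × Int × Int)) :=
  ([("C", 2), ("H", 6)], [("H", (-1, 1)), ("O", (0, 1))])

def Spec_simulate_variations (element_counts : List (String × Int)) (variations : List (String × Int × Int)) (out : List String) : Prop := out = simulate_variations_alt element_counts variations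
instance (element_counts : List (String × Int)) (variations : List (String × Int × Int)) (out : List String) : Decidable (Spec_simulate_variations element_counts variations out) := by unfold Spec_simulate_variations; infer_instance

-- ===== CLAIM (what is proved, stated in full; the proofs are below) =====
def Claim_equal_simulate_variations : Prop := ∀ (element_counts : List (String × Int)) (variations : List (String × Int × Int)), Dom_simulate_variations element_counts variations → Pre_simulate_variations element_counts variations → Spec_simulate_variations element_counts variations (simulate_variations element_counts variations)

-- ===== LEMMAS AND PROOFS =====

def Aform (ec : List (String × Int)) (ks : List String) (changes : List Int) : String :=
  let new_counts : PySem.Dict String Int :=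
    (PySem.List.enumerate ks).foldl
      (fun d p => d.insert p.2 (max 0 (d.getD p.2 0 + PySem.List.pyGetD changes p.1 0)))
      (PySem.Dict.mk ec)
  PySem.Str.join "" ((new_counts.items.filter (fun q => q.2 != 0)).map
    (fun q => PySem.Str.join "" [q.1, PySem.Int.toStr q.2]))
def cOf (combo : List Int) (t : String × Option Int × Int) : Int :=
  match t.2.1 with
  | none => t.2.2
  | some i => PySem.List.pyGetD combo i 0
def planOf (ec : List (String × Int)) (vars : List (String × Int × Int)) : List (String × Option Int × Int) :=
  let var_elems := vars.map (·.1)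
  let var_index : PySem.Dict String Int :=
    (PySem.List.enumerate var_elems).foldl (fun d p => d.insert p.2 p.1) PySem.Dict.empty
  ((ec.map (·.1)) ++ var_elems.filter (fun e => !((PySem.Dict.mk ec).contains e))).map
    (fun k => (k, var_index.get? k, PySem.Dict.getD (PySem.Dict.mk ec) k 0))
def Bform (ec : List (String × Int)) (vars : List (String × Int × Int)) (combo : List Int) : String :=
  PySem.Str.join "" ((planOf ec vars).foldl
    (fun acc t => if cOf combo t != 0 then
        acc ++ [PySem.Str.join "" [t.1, PySem.Int.toStr (cOf combo t)]]
      else acc) [])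

def Fc (ec : List (String × Int)) (ks : List String) (changes : List Int) (k : String) : Int :=
  match PySem.List.index? ks k with
  | some i => max 0 (PySem.Dict.getD (PySem.Dict.mk ec) k 0 + PySem.List.pyGetD changes (i : Int) 0)
  | none => PySem.Dict.getD (PySem.Dict.mk ec) k 0

lemma foldl_add_eq_ofList_map {α β : Type} [BEq α] (l : List β) (f : β → α) :
    l.foldl (fun s b => PySem.Set.add s (f b)) PySem.Set.empty = PySem.Set.ofList (l.map f) := by
  rw [← PySem.Set.update_map_eq_foldl_add, PySem.Set.update_empty]

-- the opts/seen fold in B's reach computation is an ordered dedup of the mapped range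
lemma optsSeen_eq_dedup (f : Int → Int) (l : List Int) :
    ∀ (acc : List Int × PySem.Set Int), acc.2 = PySem.Set.ofList acc.1 → acc.1.Nodup →
    (l.foldl (fun (st : List Int × PySem.Set Int) d =>
        let c := f d
        if st.2.contains c then st else (st.1 ++ [c], PySem.Set.add st.2 c)) acc).1
      = PySem.List.dedup (acc.1 ++ l.map f) := by
  induction l with
  | nil =>
    intro acc _ hnd
    simp [PySem.List.dedup_eq_ofList, PySem.Set.ofList_eq_self_of_nodup _ hnd]
  | cons d t ih =>
    intro acc hacc hnd
    simp only [List.foldl_cons, List.map_cons]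
    by_cases hmem : f d ∈ acc.1
    · have : acc.2.contains (f d) = true := by
        rw [hacc]; exact (PySem.Set.contains_iff _ _).mpr ((PySem.Set.mem_ofList _ _).mpr hmem)
      simp only [this, if_pos]
      rw [ih acc hacc hnd]
      rw [PySem.List.dedup_eq_ofList, PySem.List.dedup_eq_ofList,
        show acc.1 ++ f d :: t.map f = (acc.1 ++ [f d]) ++ t.map f by simp,
        PySem.Set.ofList_append, PySem.Set.ofList_append, PySem.Set.ofList_append_singleton,
        PySem.Set.add_of_mem ((PySem.Set.mem_ofList _ _).mpr hmem)]
    · have : acc.2.contains (f d) = false := by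
        rw [hacc]
        rw [← Bool.not_eq_true]
        intro hc
        exact hmem ((PySem.Set.mem_ofList _ _).mp ((PySem.Set.contains_iff _ _).mp hc))
      simp only [this, Bool.false_eq_true, if_false]
      have hnd' : (acc.1 ++ [f d]).Nodup := by
        simp only [List.nodup_append, List.nodup_singleton]
        exact ⟨hnd, trivial, fun a ha b hb => by simp at hb; subst hb; exact fun h => hmem (h ▸ ha)⟩
      rw [ih (acc.1 ++ [f d], PySem.Set.add acc.2 (f d))
            (by rw [hacc, PySem.Set.ofList_append_singleton])
            hnd']
      simp

-- the DFS over the pools enumerates exactly the cartesian product, leftmost pool slowest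
lemma svWalk_eq_product (plan : List (String × Option Int × Int)) :
    ∀ (ls : List (List Int)) (chosen : List Int) (s : PySem.Set String),
      svWalk plan ls chosen s
        = (pyProduct ls).foldl (fun s c => PySem.Set.add s
            (PySem.Str.join "" (plan.foldl (fun acc t =>
              if cOf (chosen ++ c) t != 0 then
                acc ++ [PySem.Str.join "" [t.1, PySem.Int.toStr (cOf (chosen ++ c) t)]]
              else acc) []))) s := by
  intro ls
  induction ls with
  | nil => intro chosen s; simp [svWalk, pyProduct, svEmit, cOf]
  | cons opts rest ih =>
    intro chosen s
    simp only [svWalk, pyProduct, List.foldl_flatMap, List.foldl_map]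
    apply PySem.List.foldl_congr_mem
    intro s' c _
    rw [ih (chosen ++ [c]) s']
    apply PySem.List.foldl_congr_mem
    intro s'' c' _
    simp

lemma all_changes_items (vars : List (String × Int × Int)) (h2 : (vars.map (·.1)).Nodup) :
    (vars.foldl (fun d p => d.insert p.1 (PySem.List.pyRange p.2.1 (p.2.2 + 1) 1)) PySem.Dict.empty).items
      = vars.map (fun p => (p.1, PySem.List.pyRange p.2.1 (p.2.2 + 1) 1)) := by
  have := PySem.Dict.items_foldl_insert_fresh vars (fun p => p.1)
    (fun p => PySem.List.pyRange p.2.1 (p.2.2 + 1) 1) PySem.Dict.empty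
    (fun a _ => PySem.Dict.contains_empty _) h2
  simpa using this

lemma A_eq (ec : List (String × Int)) (vars : List (String × Int × Int))
    (h2 : (vars.map (·.1)).Nodup) :
    simulate_variations ec vars
      = PySem.Set.ofList ((pyProduct (vars.map (fun p => PySem.List.pyRange p.2.1 (p.2.2 + 1) 1))).map
          (Aform ec (vars.map (·.1)))) := by
  simp only [simulate_variations, PySem.Dict.keys, PySem.Dict.values, all_changes_items vars h2,
    List.map_map, foldl_add_eq_ofList_map]
  rfl

lemma B_eq (ec : List (String × Int)) (vars : List (String × Int × Int)) :
    simulate_variations_alt ec vars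
      = PySem.Set.ofList ((pyProduct (vars.map (fun p =>
          PySem.List.dedup ((PySem.List.pyRange p.2.1 (p.2.2 + 1) 1).map
            (fun d => max 0 (PySem.Dict.getD (PySem.Dict.mk ec) p.1 0 + d)))))).map
          (Bform ec vars)) := by
  simp only [simulate_variations_alt]
  rw [svWalk_eq_product]
  rw [show (vars.map (fun p =>
      ((PySem.List.pyRange p.2.1 (p.2.2 + 1) 1).foldl
        (fun (st : List Int × PySem.Set Int) d =>
          let c := max 0 (PySem.Dict.getD (PySem.Dict.mk ec) p.1 0 + d)
          if st.2.contains c then st else (st.1 ++ [c], PySem.Set.add st.2 c))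
        ([], PySem.Set.empty)).1))
    = vars.map (fun p => PySem.List.dedup ((PySem.List.pyRange p.2.1 (p.2.2 + 1) 1).map
        (fun d => max 0 (PySem.Dict.getD (PySem.Dict.mk ec) p.1 0 + d)))) from
    List.map_congr_left (fun p _ => by
      rw [optsSeen_eq_dedup (fun d => max 0 (PySem.Dict.getD (PySem.Dict.mk ec) p.1 0 + d))
            (PySem.List.pyRange p.2.1 (p.2.2 + 1) 1) ([], PySem.Set.empty)
            (by simp [PySem.Set.ofList_nil]) List.nodup_nil]
      simp)]
  rw [foldl_add_eq_ofList_map]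
  simp only [List.nil_append]
  rfl

lemma getD_fold_enum (changes : List Int) :
    ∀ (ks : List String) (s : Int) (d : PySem.Dict String Int), ks.Nodup → ∀ k,
      ((PySem.List.enumerate ks s).foldl
        (fun d p => d.insert p.2 (max 0 (d.getD p.2 0 + PySem.List.pyGetD changes p.1 0))) d).getD k 0
      = match PySem.List.index? ks k with
        | some i => max 0 (d.getD k 0 + PySem.List.pyGetD changes (s + (i : Int)) 0)
        | none => d.getD k 0 := by
  intro ks
  induction ks with
  | nil => intro s d _ k; simp [PySem.List.enumerate_nil, PySem.List.index?]
  | cons x t ih =>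
    intro s d hnd k
    obtain ⟨hxt, hndt⟩ := List.nodup_cons.mp hnd
    rw [PySem.List.enumerate_cons, List.foldl_cons]
    rw [ih (s + 1) _ hndt k]
    by_cases hkx : k = x
    · subst hkx
      rw [PySem.List.index?_cons_self]
      have hnone : PySem.List.index? t k = none := (PySem.List.index?_eq_none_iff t k).mpr hxt
      rw [hnone]
      simp [PySem.Dict.getD_insert_self]
    · rw [PySem.List.index?_cons_of_ne t (fun h => hkx (Eq.symm h))]
      cases h : PySem.List.index? t k with
      | none => simp [PySem.Dict.getD_insert_of_ne _ _ _ hkx]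
      | some i =>
        simp only [Option.map_some, PySem.Dict.getD_insert_of_ne _ _ _ hkx]
        have : s + 1 + (i : Int) = s + ((i + 1 : Nat) : Int) := by push_cast; ring
        rw [this]

lemma get?_vidx :
    ∀ (ks : List String) (s : Int) (d : PySem.Dict String Int), ks.Nodup → ∀ k,
      ((PySem.List.enumerate ks s).foldl (fun d p => d.insert p.2 p.1) d).get? k
      = match PySem.List.index? ks k with
        | some i => some (s + (i : Int))
        | none => d.get? k := by
  intro ks
  induction ks with
  | nil => intro s d _ k; simp [PySem.List.enumerate_nil, PySem.List.index?]
  | cons x t ih =>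
    intro s d hnd k
    obtain ⟨hxt, hndt⟩ := List.nodup_cons.mp hnd
    rw [PySem.List.enumerate_cons, List.foldl_cons, ih (s + 1) _ hndt k]
    by_cases hkx : k = x
    · subst hkx
      rw [PySem.List.index?_cons_self, (PySem.List.index?_eq_none_iff t k).mpr hxt]
      simp [PySem.Dict.get?_insert_self]
    · rw [PySem.List.index?_cons_of_ne t (fun h => hkx (Eq.symm h))]
      cases h : PySem.List.index? t k with
      | none => simp [PySem.Dict.get?_insert_of_ne _ _ hkx]
      | some i =>
        simp only [Option.map_some]
        have : s + 1 + (i : Int) = s + ((i + 1 : Nat) : Int) := by push_cast; ring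
        rw [this]

lemma length_mem_pyProduct : ∀ {ls : List (List Int)} {c : List Int}, c ∈ pyProduct ls → c.length = ls.length := by
  intro ls
  induction ls with
  | nil => intro c hc; simp [pyProduct] at hc; simp [hc]
  | cons l ls ih =>
    intro c hc
    simp only [pyProduct, List.mem_flatMap, List.mem_map] at hc
    obtain ⟨x, _, c', hc', rfl⟩ := hc
    simp [ih hc']

lemma pyProduct_map {V : Type} (g : V → Int → Int) (r : V → List Int) (vs : List V) :
    pyProduct (vs.map fun p => (r p).map (g p)) =
      (pyProduct (vs.map r)).map (fun c => List.zipWith g vs c) := by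
  induction vs with
  | nil => simp [pyProduct]
  | cons p vs ih =>
    simp only [List.map_cons, pyProduct, ih, List.flatMap_map, List.map_flatMap, List.map_map]
    rfl

lemma ofList_map_inj {α β : Type} [BEq α] [LawfulBEq α] [BEq β] [LawfulBEq β]
    {g : α → β} (hg : ∀ a b, g a = g b → a = b) (l : List α) :
    PySem.Set.ofList (l.map g) = (PySem.Set.ofList l).map g := by
  induction l using List.reverseRecOn with
  | nil => simp [PySem.Set.ofList_nil]
  | append_singleton l y ih =>
    rw [List.map_append, List.map_singleton, PySem.Set.ofList_append_singleton,
        PySem.Set.ofList_append_singleton, ih]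
    by_cases hy : y ∈ PySem.Set.ofList l
    · rw [PySem.Set.add_of_mem hy, PySem.Set.add_of_mem]
      exact List.mem_map_of_mem hy
    · rw [PySem.Set.add_of_not_mem hy, PySem.Set.add_of_not_mem, List.map_append,
          List.map_singleton]
      intro hmem
      obtain ⟨a, ha, hga⟩ := List.mem_map.mp hmem
      exact hy (hg a y hga ▸ ha)

lemma ofList_flatMap_disjoint {α β : Type} [BEq α] [LawfulBEq α] [BEq β] [LawfulBEq β]
    (B : α → List β) (hd : ∀ x y, x ≠ y → ∀ v, v ∈ B x → v ∉ B y) (l : List α) :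
    PySem.Set.ofList (l.flatMap B) = (PySem.Set.ofList l).flatMap (fun x => PySem.Set.ofList (B x)) := by
  induction l using List.reverseRecOn with
  | nil => simp [PySem.Set.ofList_nil]
  | append_singleton l y ih =>
    rw [List.flatMap_append, List.flatMap_singleton, PySem.Set.ofList_append,
        PySem.Set.update_eq_append_filter, ih, PySem.Set.ofList_append_singleton]
    by_cases hy : y ∈ PySem.Set.ofList l
    · rw [PySem.Set.add_of_mem hy]
      rw [List.filter_eq_nil_iff.mpr, List.append_nil]
      intro v hv
      simp only [Bool.not_eq_true', Bool.not_eq_false]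
      have : v ∈ (PySem.Set.ofList l).flatMap (fun x => PySem.Set.ofList (B x)) :=
        List.mem_flatMap.mpr ⟨y, hy, hv⟩
      exact (PySem.Set.contains_iff _ _).mpr this
    · rw [PySem.Set.add_of_not_mem hy, List.flatMap_append, List.flatMap_singleton]
      congr 1
      rw [List.filter_eq_self.mpr]
      intro v hv
      simp only [Bool.not_eq_eq_eq_not, Bool.not_true]
      rw [← Bool.not_eq_true]
      intro hcv
      have hvmem := (PySem.Set.contains_iff _ _).mp hcv
      obtain ⟨x, hx, hvx⟩ := List.mem_flatMap.mp hvmem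
      have hxl : x ∈ l := (PySem.Set.mem_ofList _ _).mp hx
      have hyv : v ∈ B y := (PySem.Set.mem_ofList _ _).mp hv
      have hxv : v ∈ B x := (PySem.Set.mem_ofList _ _).mp hvx
      exact hd x y (fun h => hy ((PySem.Set.mem_ofList _ _).mpr (h ▸ hxl))) v hxv hyv

lemma ofList_map_dedup {α β : Type} [BEq α] [LawfulBEq α] [BEq β] [LawfulBEq β]
    (f : α → β) (l : List α) :
    PySem.Set.ofList ((PySem.List.dedup l).map f) = PySem.Set.ofList (l.map f) := by
  induction l using List.reverseRecOn with
  | nil => simp [PySem.List.dedup]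
  | append_singleton l y ih =>
    rw [PySem.List.dedup_eq_ofList, PySem.Set.ofList_append_singleton, List.map_append,
        List.map_singleton, PySem.Set.ofList_append_singleton]
    rw [PySem.List.dedup_eq_ofList] at ih
    by_cases hy : y ∈ PySem.Set.ofList l
    · rw [PySem.Set.add_of_mem hy, ih]
      rw [PySem.Set.add_of_mem]
      have : y ∈ l := (PySem.Set.mem_ofList _ _).mp hy
      exact (PySem.Set.mem_ofList _ _).mpr (List.mem_map_of_mem this)
    · rw [PySem.Set.add_of_not_mem hy, List.map_append, List.map_singleton,
        PySem.Set.ofList_append_singleton, ih]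

lemma pyProduct_dedup (ls : List (List Int)) :
    pyProduct (ls.map PySem.List.dedup) = PySem.List.dedup (pyProduct ls) := by
  induction ls with
  | nil => simp [pyProduct, PySem.List.dedup]; rfl
  | cons l ls ih =>
    simp only [List.map_cons, pyProduct, ih, PySem.List.dedup_eq_ofList]
    rw [ofList_flatMap_disjoint (fun x => (pyProduct ls).map (x :: ·))
        (by intro x y hxy v hvx hvy
            obtain ⟨c, _, rfl⟩ := List.mem_map.mp hvx
            obtain ⟨c', _, he⟩ := List.mem_map.mp hvy
            exact hxy (List.cons.injEq .. ▸ he).1.symm)]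
    congr 1
    funext x
    rw [ofList_map_inj (g := (x :: ·)) (fun a b h => (List.cons.injEq .. ▸ h).2)]

lemma point (ec : List (String × Int)) (vars : List (String × Int × Int))
    (h1 : (ec.map (·.1)).Nodup) (h2 : (vars.map (·.1)).Nodup)
    (c : List Int) (hc : c.length = vars.length) :
    Aform ec (vars.map (·.1)) c
      = Bform ec vars (List.zipWith (fun (p : String × Int × Int) (d : Int) => max 0 (PySem.Dict.getD (PySem.Dict.mk ec) p.1 0 + d)) vars c) := by
  have hecn : (PySem.Dict.mk ec).keys.Nodup := by rw [PySem.Dict.keys_mk]; exact h1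
  have hnd : ((PySem.List.enumerate (vars.map (·.1))).foldl
      (fun (d : PySem.Dict String Int) (p : Int × String) => d.insert p.2 (max 0 (d.getD p.2 0 + PySem.List.pyGetD c p.1 0)))
      (PySem.Dict.mk ec)).keys.Nodup :=
    PySem.Dict.nodup_keys_foldl_insert_key _ (fun (p : Int × String) => p.2) _ _ hecn
  have hkeys : ((PySem.List.enumerate (vars.map (·.1))).foldl
      (fun (d : PySem.Dict String Int) (p : Int × String) => d.insert p.2 (max 0 (d.getD p.2 0 + PySem.List.pyGetD c p.1 0)))
      (PySem.Dict.mk ec)).keys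
      = PySem.Set.update (ec.map (·.1)) (vars.map (·.1)) := by
    rw [PySem.Dict.keys_foldl_insert_key _ (fun (p : Int × String) => p.2) _ _, PySem.List.map_snd_enumerate,
      PySem.Dict.keys_mk]
  have hgetD : ∀ k, ((PySem.List.enumerate (vars.map (·.1))).foldl
      (fun (d : PySem.Dict String Int) (p : Int × String) => d.insert p.2 (max 0 (d.getD p.2 0 + PySem.List.pyGetD c p.1 0)))
      (PySem.Dict.mk ec)).getD k 0 = Fc ec (vars.map (·.1)) c k := by
    intro k
    rw [getD_fold_enum c (vars.map (·.1)) 0 _ h2 k]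
    unfold Fc
    cases h : PySem.List.index? (vars.map (·.1)) k with
    | none => rfl
    | some i => simp
  have hko : PySem.Set.update (ec.map (·.1)) (vars.map (·.1))
      = ec.map (·.1) ++ (vars.map (·.1)).filter (fun e => !((PySem.Dict.mk ec).contains e)) := by
    rw [PySem.Set.update_eq_append_filter, PySem.Set.ofList_eq_self_of_nodup _ h2]
    congr 1
    apply List.filter_congr
    intro e _
    congr 1
    rw [Bool.eq_iff_iff]
    simp [PySem.Dict.contains_eq_decide_mem_keys, PySem.Dict.keys_mk]
  have hitems : ((PySem.List.enumerate (vars.map (·.1))).foldl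
      (fun (d : PySem.Dict String Int) (p : Int × String) => d.insert p.2 (max 0 (d.getD p.2 0 + PySem.List.pyGetD c p.1 0)))
      (PySem.Dict.mk ec)).items
      = (ec.map (·.1) ++ (vars.map (·.1)).filter (fun e => !((PySem.Dict.mk ec).contains e))).map
          (fun k => (k, Fc ec (vars.map (·.1)) c k)) := by
    rw [PySem.Dict.items_eq_map_keys _ hnd 0, hkeys, hko]
    exact List.map_congr_left (fun k _ => by rw [hgetD k])
  have hc2 : ∀ k, cOf (List.zipWith (fun (p : String × Int × Int) (d : Int) => max 0 (PySem.Dict.getD (PySem.Dict.mk ec) p.1 0 + d)) vars c)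
      (k, ((PySem.List.enumerate (vars.map (·.1))).foldl (fun (d : PySem.Dict String Int) (p : Int × String) => d.insert p.2 p.1) PySem.Dict.empty).get? k,
        PySem.Dict.getD (PySem.Dict.mk ec) k 0)
      = Fc ec (vars.map (·.1)) c k := by
    intro k
    unfold cOf Fc
    rw [get?_vidx (vars.map (·.1)) 0 _ h2 k]
    cases h : PySem.List.index? (vars.map (·.1)) k with
    | none => simp [PySem.Dict.get?_empty]
    | some i =>
      simp only [zero_add]
      obtain ⟨hk, hksi, -⟩ := PySem.List.getElem_of_index?_eq_some h
      have hiv : i < vars.length := by simpa using hk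
      have hizip : i < (List.zipWith (fun (p : String × Int × Int) (d : Int) => max 0 (PySem.Dict.getD (PySem.Dict.mk ec) p.1 0 + d)) vars c).length := by
        simp [List.length_zipWith, hc, hiv]
      have hic : i < c.length := by omega
      rw [PySem.List.pyGetD_natCast, PySem.List.pyGetD_natCast,
        List.getD_eq_getElem _ _ hizip, List.getD_eq_getElem _ _ hic, List.getElem_zipWith]
      have : (vars[i]).1 = k := by
        have := hksi
        rwa [List.getElem_map] at this
      rw [this]
  simp only [Aform, Bform, planOf]
  rw [hitems]
  rw [PySem.List.foldl_append_if, List.nil_append]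
  simp only [List.filter_map, List.map_map]
  simp only [Function.comp_def, hc2]

-- ===== VERDICT (by name: the statement is the Claim_ definition above) =====
theorem simulate_variations_spec : Claim_equal_simulate_variations := by
  intro ec vars _ hpre
  obtain ⟨h1, h2⟩ := hpre
  unfold Spec_simulate_variations
  rw [A_eq ec vars h2, B_eq ec vars]
  rw [List.map_congr_left (fun c hc => point ec vars h1 h2 c
        (by rw [length_mem_pyProduct hc, List.length_map]))]
  rw [show (fun c => Bform ec vars (List.zipWith (fun (p : String × Int × Int) (d : Int) => max 0 (PySem.Dict.getD (PySem.Dict.mk ec) p.1 0 + d)) vars c))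
        = Bform ec vars ∘ (fun c => List.zipWith (fun (p : String × Int × Int) (d : Int) => max 0 (PySem.Dict.getD (PySem.Dict.mk ec) p.1 0 + d)) vars c) from rfl]
  rw [← List.map_map, ← pyProduct_map (fun p d => max 0 (PySem.Dict.getD (PySem.Dict.mk ec) p.1 0 + d))
        (fun p => PySem.List.pyRange p.2.1 (p.2.2 + 1) 1) vars]
  rw [← ofList_map_dedup, ← pyProduct_dedup, List.map_map]
  rfl
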